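-- pv_equiv track=rewrite | github.com/otlexy/savinov | lab 4 savinov/lab4.py | find_alpha_digit_sign_words
-- ===== SOURCE A (Python) =====
-- from typing import List
--
-- def find_alpha_digit_sign_words(words:List)->List[str]:
--     """Ищет слова, имеющие знак, букву и цифру
--     Возвращает список найденных слов"""
--     special = []
--
--     for word in words:
--         bukva = False
--         cifra = False
--         znak = False
--         for char in word:
--             if char.isalpha():
--                 bukva = True
--             elif char.isdigit():
--                 cifra = True
--             else:
--                 znak = True
--
--         if bukva == True and cifra == True and znak == True:
--             special.append(word)
--     return special
-- ===== SOURCE B (Python) =====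
-- def find_alpha_digit_sign_words(words):
--     """Ищет слова, имеющие знак, букву и цифру"""
--     return [word for word in words
--             if any(c.isalpha() for c in word)
--             and any(c.isdigit() for c in word)
--             and any(not c.isalpha() and not c.isdigit() for c in word)]
-- ===== Notes on version B (the rewrite author's own statement) =====
-- stated objective: idiomatic
-- what changed: Replaced the flag-accumulating nested loop with a list comprehension whose predicate is three independent any() existence scans over the word (letter, digit, sign).
import Mathlib
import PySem

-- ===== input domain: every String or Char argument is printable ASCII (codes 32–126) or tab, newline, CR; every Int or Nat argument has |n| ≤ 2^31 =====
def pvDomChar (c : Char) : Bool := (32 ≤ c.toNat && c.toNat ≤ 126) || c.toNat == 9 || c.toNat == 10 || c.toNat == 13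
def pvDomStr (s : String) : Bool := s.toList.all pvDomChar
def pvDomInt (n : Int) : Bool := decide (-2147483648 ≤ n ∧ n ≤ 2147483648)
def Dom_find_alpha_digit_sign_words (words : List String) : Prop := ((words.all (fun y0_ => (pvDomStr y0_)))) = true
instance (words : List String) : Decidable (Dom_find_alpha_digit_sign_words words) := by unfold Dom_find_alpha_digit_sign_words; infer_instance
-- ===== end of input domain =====

-- B rewrites A's flag-accumulating nested loop as a list comprehension with three independent any() existence scans (idiomatic; same cost).

-- ===== PORT A =====
-- literal port of A: one pass per word maintaining three boolean flags (bukva, cifra, znak)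
def find_alpha_digit_sign_words (words : List String) : List String :=
  words.foldl (fun special word =>
    let flags : Bool × Bool × Bool :=
      word.toList.foldl (fun (st : Bool × Bool × Bool) char =>
        if PySem.Chars.isalpha char then (true, st.2.1, st.2.2)
        else if PySem.Chars.isdigit char then (st.1, true, st.2.2)
        else (st.1, st.2.1, true)) (false, false, false)
    if flags.1 && flags.2.1 && flags.2.2 then special ++ [word] else special) []

-- ===== PORT B =====
-- port of B: filter by three independent existence scans of the word
def find_alpha_digit_sign_words_alt (words : List String) : List String :=
  words.filter (fun word =>
    word.toList.any (fun c => PySem.Chars.isalpha c) &&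
    word.toList.any (fun c => PySem.Chars.isdigit c) &&
    word.toList.any (fun c => !PySem.Chars.isalpha c && !PySem.Chars.isdigit c))

-- ===== PRECONDITION & SPEC =====
def Spec_find_alpha_digit_sign_words (words : List String) (out : List String) : Prop := out = find_alpha_digit_sign_words_alt words
instance (words : List String) (out : List String) : Decidable (Spec_find_alpha_digit_sign_words words out) := by unfold Spec_find_alpha_digit_sign_words; infer_instance

-- ===== CLAIM (what is proved, stated in full; the proofs are below) =====
def Claim_equal_find_alpha_digit_sign_words : Prop := ∀ (words : List String), Dom_find_alpha_digit_sign_words words → Spec_find_alpha_digit_sign_words words (find_alpha_digit_sign_words words)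

-- ===== LEMMAS AND PROOFS =====

-- a digit character is never a letter (the PySem ASCII predicates are disjoint)
theorem pv_digit_not_alpha (c : Char) (h : PySem.Chars.isdigit c = true) :
    PySem.Chars.isalpha c = false := by
  simp only [PySem.Chars.isdigit, PySem.Chars.isalpha, PySem.Chars.isupper, PySem.Chars.islower,
    decide_eq_true_eq, Bool.or_eq_false_iff, Bool.and_eq_false_iff, decide_eq_false_iff_not,
    Char.le_def, UInt32.le_iff_toNat_le, Bool.and_eq_true, not_le] at *
  have e0 : ('0' : Char).val.toNat = 48 := rfl
  have e9 : ('9' : Char).val.toNat = 57 := rfl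
  have eA : ('A' : Char).val.toNat = 65 := rfl
  have eZ : ('Z' : Char).val.toNat = 90 := rfl
  have ea : ('a' : Char).val.toNat = 97 := rfl
  have ez : ('z' : Char).val.toNat = 122 := rfl
  omega

-- A's inner flag loop computes three existence scans
theorem pv_flags (cs : List Char) (b c z : Bool) :
    cs.foldl (fun (st : Bool × Bool × Bool) char =>
        if PySem.Chars.isalpha char then (true, st.2.1, st.2.2)
        else if PySem.Chars.isdigit char then (st.1, true, st.2.2)
        else (st.1, st.2.1, true)) (b, c, z)
    = (b || cs.any (fun ch => PySem.Chars.isalpha ch),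
       c || cs.any (fun ch => PySem.Chars.isdigit ch),
       z || cs.any (fun ch => !PySem.Chars.isalpha ch && !PySem.Chars.isdigit ch)) := by
  induction cs generalizing b c z with
  | nil => simp
  | cons hd tl ih =>
    by_cases ha : PySem.Chars.isalpha hd = true
    · have hdg : PySem.Chars.isdigit hd = false := by
        cases hdg : PySem.Chars.isdigit hd with
        | false => rfl
        | true => exact absurd ha (by simp [pv_digit_not_alpha hd hdg])
      simp [List.foldl_cons, ha, hdg, ih]
    · by_cases hdg : PySem.Chars.isdigit hd = true
      · simp [List.foldl_cons, ha, hdg, ih]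
      · simp [List.foldl_cons, ha, hdg, ih]

-- ===== VERDICT (by name: the statement is the Claim_ definition above) =====
theorem find_alpha_digit_sign_words_spec : Claim_equal_find_alpha_digit_sign_words := by
  intro words _
  unfold Spec_find_alpha_digit_sign_words find_alpha_digit_sign_words find_alpha_digit_sign_words_alt
  rw [show (fun (special : List String) word =>
      let flags : Bool × Bool × Bool :=
        word.toList.foldl (fun (st : Bool × Bool × Bool) char =>
          if PySem.Chars.isalpha char then (true, st.2.1, st.2.2)
          else if PySem.Chars.isdigit char then (st.1, true, st.2.2)
          else (st.1, st.2.1, true)) (false, false, false)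
      if flags.1 && flags.2.1 && flags.2.2 then special ++ [word] else special)
    = (fun special word =>
      if (word.toList.any (fun c => PySem.Chars.isalpha c) &&
          word.toList.any (fun c => PySem.Chars.isdigit c) &&
          word.toList.any (fun c => !PySem.Chars.isalpha c && !PySem.Chars.isdigit c))
      then special ++ [word] else special)
    from by funext special word; simp [pv_flags]]
  rw [PySem.List.foldl_append_if_eq_filter]
  simp
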